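-- pv_equiv track=rewrite | github.com/Oichkatzelesfrettschen/Blackhole | blender/addon/blackhole_physics/operators.py | _summarize_policy_actions
-- ===== SOURCE A (Python) =====
-- def _summarize_policy_actions(actions: list[str]) -> dict[str, int]:
--     """Count reused/created/updated prerequisite actions for a policy run."""
--     summary = {"reused": 0, "created": 0, "updated": 0, "other": 0}
--     for action in actions:
--         if action.endswith("_reused"):
--             summary["reused"] += 1
--         elif action.endswith("_created"):
--             summary["created"] += 1
--         elif action.endswith("_updated"):
--             summary["updated"] += 1
--         else:
--             summary["other"] += 1
--     summary["total"] = len(actions)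
--     return summary
-- ===== SOURCE B (Python) =====
-- def _summarize_policy_actions(actions: list[str]) -> dict[str, int]:
--     """Count reused/created/updated prerequisite actions for a policy run."""
--     total = len(actions)
--     reused = sum(1 for a in actions if a.endswith("_reused"))
--     created = sum(1 for a in actions if a.endswith("_created"))
--     updated = sum(1 for a in actions if a.endswith("_updated"))
--     return {
--         "reused": reused,
--         "created": created,
--         "updated": updated,
--         "other": total - reused - created - updated,
--         "total": total,
--     }
-- ===== Notes on version B (the rewrite author's own statement) =====
-- stated objective: alternative
-- what changed: Replaces the single branching if/elif loop over a mutable dict with independent per-suffix counting passes (the three suffixes are mutually exclusive, so order never matters) and derives 'other' arithmetically as total minus the three counts.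
import Mathlib
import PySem

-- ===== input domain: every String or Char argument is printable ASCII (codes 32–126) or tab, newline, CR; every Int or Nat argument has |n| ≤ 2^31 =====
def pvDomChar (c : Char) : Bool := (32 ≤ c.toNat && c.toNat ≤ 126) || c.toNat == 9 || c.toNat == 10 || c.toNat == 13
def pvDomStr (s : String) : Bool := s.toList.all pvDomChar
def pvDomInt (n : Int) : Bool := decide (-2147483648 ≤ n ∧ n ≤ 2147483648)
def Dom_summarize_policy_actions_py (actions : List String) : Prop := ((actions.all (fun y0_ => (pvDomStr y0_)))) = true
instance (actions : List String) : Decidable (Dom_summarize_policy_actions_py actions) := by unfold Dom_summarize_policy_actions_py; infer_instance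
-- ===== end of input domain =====

-- B replaces A's single branching loop over a mutable dict with independent per-suffix counts
-- (the suffixes are mutually exclusive) and derives "other" arithmetically; alternative decomposition, same cost.


-- ===== PORT A =====
-- summary["k"] += 1 is Dict.modify "k" 0 (· + 1); exact here since the key is always present.
def summarize_policy_actions_py (actions : List String) : List (String × Int) :=
  let summary : PySem.Dict String Int :=
    PySem.Dict.ofList [("reused", 0), ("created", 0), ("updated", 0), ("other", 0)]
  let summary := actions.foldl (fun d action =>
    if PySem.Str.endswith action "_reused" then d.modify "reused" 0 (· + 1)
    else if PySem.Str.endswith action "_created" then d.modify "created" 0 (· + 1)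
    else if PySem.Str.endswith action "_updated" then d.modify "updated" 0 (· + 1)
    else d.modify "other" 0 (· + 1)) summary
  (summary.insert "total" (actions.length : Int)).items

-- ===== PORT B =====
def summarize_policy_actions_py_alt (actions : List String) : List (String × Int) :=
  let total : Int := actions.length
  let reused : Int := actions.countP (fun a => PySem.Str.endswith a "_reused")
  let created : Int := actions.countP (fun a => PySem.Str.endswith a "_created")
  let updated : Int := actions.countP (fun a => PySem.Str.endswith a "_updated")
  [("reused", reused), ("created", created), ("updated", updated),
   ("other", total - reused - created - updated), ("total", total)]

-- ===== PRECONDITION & SPEC =====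
def Spec_summarize_policy_actions_py (actions : List String) (out : List (String × Int)) : Prop := out = summarize_policy_actions_py_alt actions
instance (actions : List String) (out : List (String × Int)) : Decidable (Spec_summarize_policy_actions_py actions out) := by unfold Spec_summarize_policy_actions_py; infer_instance

-- ===== CLAIM (what is proved, stated in full; the proofs are below) =====
def Claim_equal_summarize_policy_actions_py : Prop := ∀ (actions : List String), Dom_summarize_policy_actions_py actions → Spec_summarize_policy_actions_py actions (summarize_policy_actions_py actions)

-- ===== LEMMAS AND PROOFS =====

-- The three suffixes are mutually exclusive: no string ends with two of them.
lemma excl_12 (a : String) (h : PySem.Str.endswith a "_reused" = true) :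
    PySem.Str.endswith a "_created" = false := by
  by_contra hc
  rw [Bool.not_eq_false] at hc
  rw [PySem.Str.endswith_eq, PySem.Chars.endswith_iff] at h hc
  rcases List.prefix_or_prefix_of_prefix (List.reverse_prefix.mpr h) (List.reverse_prefix.mpr hc)
    with h' | h' <;> revert h' <;> decide

lemma excl_13 (a : String) (h : PySem.Str.endswith a "_reused" = true) :
    PySem.Str.endswith a "_updated" = false := by
  by_contra hc
  rw [Bool.not_eq_false] at hc
  rw [PySem.Str.endswith_eq, PySem.Chars.endswith_iff] at h hc
  rcases List.prefix_or_prefix_of_prefix (List.reverse_prefix.mpr h) (List.reverse_prefix.mpr hc)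
    with h' | h' <;> revert h' <;> decide

lemma excl_23 (a : String) (h : PySem.Str.endswith a "_created" = true) :
    PySem.Str.endswith a "_updated" = false := by
  by_contra hc
  rw [Bool.not_eq_false] at hc
  rw [PySem.Str.endswith_eq, PySem.Chars.endswith_iff] at h hc
  rcases List.prefix_or_prefix_of_prefix (List.reverse_prefix.mpr h) (List.reverse_prefix.mpr hc)
    with h' | h' <;> revert h' <;> decide

-- Bumping one slot of the literal four-key dict.
lemma modR (r c u o : Int) :
    (PySem.Dict.mk (κ := String) [("reused", r), ("created", c), ("updated", u), ("other", o)]).modify "reused" 0 (· + 1)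
    = PySem.Dict.mk [("reused", r + 1), ("created", c), ("updated", u), ("other", o)] := by
  simp [PySem.Dict.modify, PySem.Dict.insert, PySem.Dict.getD, PySem.Dict.get?, PySem.Dict.contains]

lemma modC (r c u o : Int) :
    (PySem.Dict.mk (κ := String) [("reused", r), ("created", c), ("updated", u), ("other", o)]).modify "created" 0 (· + 1)
    = PySem.Dict.mk [("reused", r), ("created", c + 1), ("updated", u), ("other", o)] := by
  simp [PySem.Dict.modify, PySem.Dict.insert, PySem.Dict.getD, PySem.Dict.get?, PySem.Dict.contains]

lemma modU (r c u o : Int) :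
    (PySem.Dict.mk (κ := String) [("reused", r), ("created", c), ("updated", u), ("other", o)]).modify "updated" 0 (· + 1)
    = PySem.Dict.mk [("reused", r), ("created", c), ("updated", u + 1), ("other", o)] := by
  simp [PySem.Dict.modify, PySem.Dict.insert, PySem.Dict.getD, PySem.Dict.get?, PySem.Dict.contains]

lemma modO (r c u o : Int) :
    (PySem.Dict.mk (κ := String) [("reused", r), ("created", c), ("updated", u), ("other", o)]).modify "other" 0 (· + 1)
    = PySem.Dict.mk [("reused", r), ("created", c), ("updated", u), ("other", o + 1)] := by
  simp [PySem.Dict.modify, PySem.Dict.insert, PySem.Dict.getD, PySem.Dict.get?, PySem.Dict.contains]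

-- Loop invariant: A's fold over the four-key dict just adds the per-category counts.
lemma loop_eq (acts : List String) (r c u o : Int) :
    acts.foldl (fun d action =>
      if PySem.Str.endswith action "_reused" then d.modify "reused" 0 (· + 1)
      else if PySem.Str.endswith action "_created" then d.modify "created" 0 (· + 1)
      else if PySem.Str.endswith action "_updated" then d.modify "updated" 0 (· + 1)
      else d.modify "other" 0 (· + 1))
      (PySem.Dict.mk [("reused", r), ("created", c), ("updated", u), ("other", o)]) =
    PySem.Dict.mk [("reused", r + (acts.countP (fun a => PySem.Str.endswith a "_reused") : Int)),
      ("created", c + (acts.countP (fun a => PySem.Str.endswith a "_created") : Int)),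
      ("updated", u + (acts.countP (fun a => PySem.Str.endswith a "_updated") : Int)),
      ("other", o + (acts.countP (fun a => !PySem.Str.endswith a "_reused" &&
        !PySem.Str.endswith a "_created" && !PySem.Str.endswith a "_updated") : Int))] := by
  induction acts generalizing r c u o with
  | nil => simp
  | cons a t ih =>
    simp only [List.foldl_cons, List.countP_cons]
    by_cases h1 : PySem.Str.endswith a "_reused" = true
    · have h2 := excl_12 a h1
      have h3 := excl_13 a h1
      rw [if_pos h1, modR, ih]
      simp at h1 h2 h3
      simp [h1, h2, h3]
      all_goals omega
    · by_cases h2 : PySem.Str.endswith a "_created" = true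
      · have h3 := excl_23 a h2
        rw [if_neg h1, if_pos h2, modC, ih]
        simp at h1 h2 h3
        simp [h1, h2, h3]
        all_goals omega
      · by_cases h3 : PySem.Str.endswith a "_updated" = true
        · rw [if_neg h1, if_neg h2, if_pos h3, modU, ih]
          simp at h1 h2 h3
          simp [h1, h2, h3]
          omega
        · rw [if_neg h1, if_neg h2, if_neg h3, modO, ih]
          simp at h1 h2 h3
          simp [h1, h2, h3]
          omega

-- The four exclusive categories partition the list.
lemma count_partition (acts : List String) :
    acts.countP (fun a => PySem.Str.endswith a "_reused")
      + acts.countP (fun a => PySem.Str.endswith a "_created")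
      + acts.countP (fun a => PySem.Str.endswith a "_updated")
      + acts.countP (fun a => !PySem.Str.endswith a "_reused" &&
          !PySem.Str.endswith a "_created" && !PySem.Str.endswith a "_updated")
      = acts.length := by
  induction acts with
  | nil => simp
  | cons a t ih =>
    simp only [List.countP_cons, List.length_cons]
    by_cases h1 : PySem.Str.endswith a "_reused" = true
    · have h2 := excl_12 a h1
      have h3 := excl_13 a h1
      simp at h1 h2 h3 ih
      simp [h1, h2, h3]
      all_goals omega
    · by_cases h2 : PySem.Str.endswith a "_created" = true
      · have h3 := excl_23 a h2
        simp at h1 h2 h3 ih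
        simp [h1, h2, h3]
        all_goals omega
      · by_cases h3 : PySem.Str.endswith a "_updated" = true
        · simp at h1 h2 h3 ih
          simp [h1, h2, h3]
          all_goals omega
        · simp at h1 h2 h3 ih
          simp [h1, h2, h3]
          all_goals omega

-- The initial dict literal, built as Python builds it.
lemma init_dict :
    (PySem.Dict.ofList [("reused", 0), ("created", 0), ("updated", 0), ("other", 0)] : PySem.Dict String Int)
    = PySem.Dict.mk [("reused", 0), ("created", 0), ("updated", 0), ("other", 0)] := by decide

-- ===== VERDICT (by name: the statement is the Claim_ definition above) =====
theorem summarize_policy_actions_py_spec : Claim_equal_summarize_policy_actions_py := by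
  intro actions _
  show summarize_policy_actions_py actions = summarize_policy_actions_py_alt actions
  simp only [summarize_policy_actions_py, summarize_policy_actions_py_alt]
  rw [init_dict, loop_eq]
  have hcp := count_partition actions
  simp at hcp
  simp [PySem.Dict.insert, PySem.Dict.contains]
  all_goals omega
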